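-- pv_equiv track=rewrite | github.com/RiyaMathew-11/aoc-challenges | day_06/solution_partB.py | processCephalopodMath
-- ===== SOURCE A (Python) =====
-- def processCephalopodMath(lines: list[str]):
--
--     max_len = max(len(line) for line in lines)
--     lines = [line.ljust(max_len) for line in lines]
--
--     matrices = {}
--     matrix_count = 0
--     start_col = 0
--     col = 0
--
--     while col < max_len:
--         # Check if current column is all spaces (separator)
--         is_separator = all(lines[row][col] == ' ' for row in range(5))
--
--         if is_separator:
--             # Save current matrix if there is one
--             if col > start_col:
--                 matrix = [list(lines[row][start_col:col]) for row in range(4)]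
--                 matrices[matrix_count] = matrix
--                 matrix_count += 1
--
--             # Skip all consecutive space columns
--             while col < max_len and all(lines[row][col] == ' ' for row in range(5)):
--                 col += 1
--             start_col = col
--         else:
--             col += 1
--
--     if start_col < max_len:
--         matrix = [list(lines[row][start_col:max_len]) for row in range(4)]
--         matrices[matrix_count] = matrix
--
--     return matrices
-- ===== SOURCE B (Python) =====
-- def processCephalopodMath(lines: list[str]):
--     max_len = max(len(line) for line in lines)
--     padded = [line.ljust(max_len) for line in lines]
--     sep = [all(padded[r][c] == ' ' for r in range(5)) for c in range(max_len)]
--     starts = [c for c in range(max_len) if not sep[c] and (c == 0 or sep[c - 1])]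
--     ends = [c + 1 for c in range(max_len) if not sep[c] and (c + 1 == max_len or sep[c + 1])]
--     return {i: [list(padded[r][s:e]) for r in range(4)]
--             for i, (s, e) in enumerate(zip(starts, ends))}
-- ===== Notes on version B (the rewrite author's own statement) =====
-- stated objective: idiomatic
-- what changed: Replaced A's stateful while-loop with nested skip-loop and after-loop final-matrix special case by a declarative pass: precompute a per-column separator mask, read off run starts and ends as boundary columns with two comprehensions, and build the dict by enumerating the zipped (start,end) runs.
import Mathlib
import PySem

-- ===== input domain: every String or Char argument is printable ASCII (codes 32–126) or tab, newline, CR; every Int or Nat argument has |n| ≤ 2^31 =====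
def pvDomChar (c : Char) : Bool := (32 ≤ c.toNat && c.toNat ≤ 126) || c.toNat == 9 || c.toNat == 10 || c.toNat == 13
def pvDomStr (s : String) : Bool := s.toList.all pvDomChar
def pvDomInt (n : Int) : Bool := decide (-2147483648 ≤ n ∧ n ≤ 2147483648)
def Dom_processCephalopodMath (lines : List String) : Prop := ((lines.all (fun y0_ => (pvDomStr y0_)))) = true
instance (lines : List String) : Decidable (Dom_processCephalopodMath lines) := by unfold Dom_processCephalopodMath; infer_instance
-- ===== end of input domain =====

-- B replaces A's stateful while-loop (with inner skip-loop and after-loop final-matrix special case)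
-- by a declarative pass: a per-column separator mask, run starts/ends read off as boundary columns by
-- two comprehensions, and the result built by enumerating the zipped runs (objective: more idiomatic).

-- shared helpers: both Pythons compute max(len(line)...), the ljust-padding, the
-- all-rows-space column test and [list(lines[r][s:e]) for r in range(4)] verbatim.
-- Python max over a nonempty list of lengths = foldl Nat.max 0 (exact for lines ≠ []).
def pvLen (lines : List String) : Nat := (lines.map (fun l => l.toList.length)).foldl Nat.max 0
-- line.ljust(m): exact since m is the maximum length.
def pvPad (lines : List String) (m : Nat) : List (List Char) :=
  lines.map (fun l => l.toList ++ List.replicate (m - l.toList.length) ' ')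
-- lines[r][c]: inside Pre_ the indices are in range; out-of-range rows read as ' '
-- (matches Python's lazy short-circuit of all() on the inputs Pre_ admits).
def pvRow (p : List (List Char)) (r c : Nat) : Char := (p.getD r []).getD c ' '
-- all(lines[row][col] == ' ' for row in range(5))
def pvColSep (p : List (List Char)) (c : Nat) : Bool := (List.range 5).all (fun r => pvRow p r c == ' ')
-- [list(lines[row][s:e]) for row in range(4)]; slice [s:e] with 0 ≤ s is drop/take (exact)
def pvMatrix (p : List (List Char)) (s e : Nat) : List (List String) :=
  (List.range 4).map (fun r => (((p.getD r []).drop s).take (e - s)).map (fun ch => String.ofList [ch]))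

-- ===== PORT A =====
-- inner `while col < max_len and all(...)`: skip consecutive separator columns
def skipA (p : List (List Char)) (m c : Nat) : Nat :=
  if h : c < m ∧ pvColSep p c = true then skipA p m (c + 1) else c
termination_by m - c
decreasing_by omega

theorem le_skipA (p : List (List Char)) (m c : Nat) : c ≤ skipA p m c := by
  fun_induction skipA p m c with
  | case1 c h ih => omega
  | case2 c h => exact Nat.le_refl c

theorem lt_skipA (p : List (List Char)) (m c : Nat) (h1 : c < m) (h2 : pvColSep p c = true) :
    c < skipA p m c := by
  rw [skipA, dif_pos ⟨h1, h2⟩]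
  exact Nat.lt_of_lt_of_le (Nat.lt_succ_self c) (le_skipA p m (c + 1))

-- the outer while loop; state = (matrices as assoc list, matrix_count, start_col)
def loopA (p : List (List Char)) (m c s : Nat) (k : Int)
    (acc : List (Int × List (List String))) : List (Int × List (List String)) × Int × Nat :=
  if h : c < m then
    if hs : pvColSep p c = true then
      -- save the pending matrix (if any), then skip the separator columns
      loopA p m (skipA p m c) (skipA p m c) (if s < c then k + 1 else k)
        (if s < c then acc ++ [(k, pvMatrix p s c)] else acc)
    else loopA p m (c + 1) s k acc
  else (acc, k, s)
termination_by m - c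
decreasing_by
  · have := lt_skipA p m c h hs; omega
  · omega

def processCephalopodMath (lines : List String) : List (Int × List (List String)) :=
  let m := pvLen lines
  let p := pvPad lines m
  let r := loopA p m 0 0 0 []
  if r.2.2 < m then r.1 ++ [(r.2.1, pvMatrix p r.2.2 m)] else r.1

-- ===== PORT B =====
def processCephalopodMath_alt (lines : List String) : List (Int × List (List String)) :=
  let m := pvLen lines
  let p := pvPad lines m
  let sep : List Bool := (List.range m).map (fun c => pvColSep p c)
  let starts := (List.range m).filter (fun c => !(sep.getD c true) && (c == 0 || sep.getD (c - 1) true))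
  let ends := ((List.range m).filter
      (fun c => !(sep.getD c true) && (c + 1 == m || sep.getD (c + 1) true))).map (fun c => c + 1)
  (PySem.List.enumerate (starts.zip ends) 0).map (fun ie => (ie.1, pvMatrix p ie.2.1 ie.2.2))

-- ===== PRECONDITION & SPEC =====
-- Pre_ excludes exactly the inputs where the Python A raises: [] (ValueError from max), and
-- inputs with fewer than 5 lines on which an out-of-range row is actually indexed (IndexError) —
-- i.e. it keeps ≥ 5 lines, all-empty lines, and 4 lines with no all-space column.
def Pre_processCephalopodMath (lines : List String) : Prop :=
  lines ≠ [] ∧ (5 ≤ lines.length ∨ (∀ l ∈ lines, l = "") ∨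
    (lines.length = 4 ∧ ∀ c < pvLen lines, ∃ l ∈ lines, l.toList.getD c ' ' ≠ ' '))
instance (lines : List String) : Decidable (Pre_processCephalopodMath lines) := by
  unfold Pre_processCephalopodMath; infer_instance
def pvWitness_processCephalopodMath : List String := ["ab cd", "ef gh", "ij kl", "mn op", "qr st"]

def Spec_processCephalopodMath (lines : List String) (out : List (Int × List (List String))) : Prop :=
  out = processCephalopodMath_alt lines
instance (lines : List String) (out : List (Int × List (List String))) :
    Decidable (Spec_processCephalopodMath lines out) := by unfold Spec_processCephalopodMath; infer_instance

-- ===== CLAIM (what is proved, stated in full; the proofs are below) =====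
def Claim_equal_processCephalopodMath : Prop := ∀ (lines : List String), Dom_processCephalopodMath lines → Pre_processCephalopodMath lines → Spec_processCephalopodMath lines (processCephalopodMath lines)

-- ===== LEMMAS AND PROOFS =====

theorem skipA_le (p : List (List Char)) (m c : Nat) (h : c ≤ m) : skipA p m c ≤ m := by
  fun_induction skipA p m c with
  | case1 c h' ih => exact ih (by omega)
  | case2 c h' => exact h

-- first separator column ≥ c (or m)
def endOfC (p : List (List Char)) (m c : Nat) : Nat :=
  if h : c < m then (if pvColSep p c then c else endOfC p m (c + 1)) else m
termination_by m - c
decreasing_by omega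

theorem le_endOfC (p : List (List Char)) (m c : Nat) (hcm : c ≤ m) : c ≤ endOfC p m c := by
  fun_induction endOfC p m c with
  | case1 c h hs => omega
  | case2 c h hs ih => have := ih (by omega); omega
  | case3 c h => omega

theorem lt_endOfC (p : List (List Char)) (m c : Nat) (h : c < m) (hs : ¬ pvColSep p c = true) :
    c < endOfC p m c := by
  rw [endOfC, dif_pos h, if_neg hs]
  have := le_endOfC p m (c + 1) (by omega); omega

-- the maximal non-separator runs [s, e) of columns from position c on
def runsFrom (p : List (List Char)) (m c : Nat) : List (Nat × Nat) :=
  if h : c < m then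
    if hs : pvColSep p c = true then runsFrom p m (c + 1)
    else (c, endOfC p m c) :: runsFrom p m (endOfC p m c)
  else []
termination_by m - c
decreasing_by
  · omega
  · have hlt : c < endOfC p m c := lt_endOfC p m c h (by simp [hs])
    omega

def emit (p : List (List Char)) (k : Int) : List (Nat × Nat) → List (Int × List (List String))
  | [] => []
  | (s, e) :: t => (k, pvMatrix p s e) :: emit p (k + 1) t

-- equation lemmas for runsFrom / endOfC
theorem runsFrom_stop (p : List (List Char)) (m c : Nat) (h : ¬ c < m) : runsFrom p m c = [] := by
  rw [runsFrom, dif_neg h]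

theorem runsFrom_sep (p : List (List Char)) (m c : Nat) (h : c < m) (hs : pvColSep p c = true) :
    runsFrom p m c = runsFrom p m (c + 1) := by
  rw [runsFrom, dif_pos h, dif_pos hs]

theorem runsFrom_nonsep (p : List (List Char)) (m c : Nat) (h : c < m) (hs : ¬ pvColSep p c = true) :
    runsFrom p m c = (c, endOfC p m c) :: runsFrom p m (endOfC p m c) := by
  rw [runsFrom, dif_pos h, dif_neg hs]

theorem endOfC_stop (p : List (List Char)) (m c : Nat) (h : ¬ c < m) : endOfC p m c = m := by
  rw [endOfC, dif_neg h]

theorem endOfC_sep (p : List (List Char)) (m c : Nat) (h : c < m) (hs : pvColSep p c = true) :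
    endOfC p m c = c := by
  rw [endOfC, dif_pos h, if_pos hs]

theorem endOfC_nonsep (p : List (List Char)) (m c : Nat) (h : c < m) (hs : ¬ pvColSep p c = true) :
    endOfC p m c = endOfC p m (c + 1) := by
  rw [endOfC, dif_pos h, if_neg hs]

theorem runsFrom_skipA (p : List (List Char)) (m c : Nat) :
    runsFrom p m (skipA p m c) = runsFrom p m c := by
  fun_induction skipA p m c with
  | case1 c h ih => rw [ih, runsFrom_sep p m c h.1 h.2]
  | case2 c h => rfl

-- A's after-loop final-matrix special case
def postA (p : List (List Char)) (m : Nat) (r : List (Int × List (List String)) × Int × Nat) :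
    List (Int × List (List String)) :=
  if r.2.2 < m then r.1 ++ [(r.2.1, pvMatrix p r.2.2 m)] else r.1

-- the A-side invariant: the loop result, with the final special case applied, appends the
-- remaining runs (including the possibly pending run started at s) enumerated from k
theorem loopA_spec (p : List (List Char)) (m : Nat) :
    ∀ (n c s : Nat) (k : Int) (acc : List (Int × List (List String))),
      m - c ≤ n → s ≤ c → c ≤ m → (∀ j, s ≤ j → j < c → pvColSep p j = false) →
      postA p m (loopA p m c s k acc) =
        acc ++ emit p k (if s < c then (s, endOfC p m c) :: runsFrom p m (endOfC p m c)
                         else runsFrom p m c) := by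
  intro n
  induction n with
  | zero =>
    intro c s k acc hf hsc hcm hrun
    rw [loopA, dif_neg (by omega)]
    rw [runsFrom_stop p m c (by omega), endOfC_stop p m c (by omega)]
    by_cases hs : s < c
    · rw [if_pos hs, runsFrom_stop p m m (by omega)]
      simp [postA, emit, show s < m by omega]
    · rw [if_neg hs]; simp [postA, emit, show ¬ s < m by omega]
  | succ n ih =>
    intro c s k acc hf hsc hcm hrun
    by_cases h : c < m
    · rw [loopA, dif_pos h]
      by_cases hsep : pvColSep p c = true
      · rw [dif_pos hsep]
        have hsk1 : c < skipA p m c := lt_skipA p m c h hsep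
        have hsk2 : skipA p m c ≤ m := skipA_le p m c (by omega)
        by_cases hpend : s < c
        · rw [if_pos hpend, if_pos hpend]
          have hrec := ih (skipA p m c) (skipA p m c) (k + 1) (acc ++ [(k, pvMatrix p s c)])
            (by omega) (le_refl _) hsk2 (by intro j h1 h2; omega)
          rw [if_neg (lt_irrefl _)] at hrec
          rw [hrec, runsFrom_skipA, if_pos hpend, endOfC_sep p m c h hsep]
          simp [emit]
        · rw [if_neg hpend, if_neg hpend]
          have hrec := ih (skipA p m c) (skipA p m c) k acc
            (by omega) (le_refl _) hsk2 (by intro j h1 h2; omega)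
          rw [if_neg (lt_irrefl _)] at hrec
          rw [hrec, runsFrom_skipA, if_neg hpend]
      · rw [dif_neg hsep]
        have hrec := ih (c + 1) s k acc (by omega) (by omega) (by omega)
          (by intro j h1 h2
              by_cases hj : j < c
              · exact hrun j h1 hj
              · have hjc : j = c := by omega
                subst hjc; simpa using hsep)
        rw [hrec, if_pos (show s < c + 1 by omega)]
        rw [show endOfC p m (c + 1) = endOfC p m c from (endOfC_nonsep p m c h hsep).symm]
        by_cases hpend : s < c
        · rw [if_pos hpend]
        · have hse : s = c := by omega
          subst hse
          rw [if_neg (lt_irrefl s), runsFrom_nonsep p m s h hsep]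
    · rw [loopA, dif_neg h]
      rw [runsFrom_stop p m c h, endOfC_stop p m c h]
      by_cases hs : s < c
      · rw [if_pos hs, runsFrom_stop p m m (by omega)]
        simp [postA, emit, show s < m by omega]
      · rw [if_neg hs]; simp [postA, emit, show ¬ s < m by omega]

-- A's result is the runs of the whole column range, enumerated from 0
theorem A_eq (lines : List String) :
    processCephalopodMath lines =
      emit (pvPad lines (pvLen lines)) 0 (runsFrom (pvPad lines (pvLen lines)) (pvLen lines) 0) := by
  have h := loopA_spec (pvPad lines (pvLen lines)) (pvLen lines) (pvLen lines) 0 0 0 []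
    (by omega) (le_refl 0) (by omega) (by intro j h1 h2; omega)
  rw [if_neg (lt_irrefl 0)] at h
  simpa [processCephalopodMath, postA] using h

-- B-side: the boundary-column predicates, with the mask lookups resolved
def startB (p : List (List Char)) (c : Nat) : Bool :=
  !(pvColSep p c) && (c == 0 || pvColSep p (c - 1))
def endB (p : List (List Char)) (m c : Nat) : Bool :=
  !(pvColSep p c) && (c + 1 == m || pvColSep p (c + 1))

theorem getD_mask (p : List (List Char)) (m c : Nat) (d : Bool) (h : c < m) :
    ((List.range m).map (fun c => pvColSep p c)).getD c d = pvColSep p c := by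
  simp [List.getD, h]

theorem starts_eq (p : List (List Char)) (m : Nat) :
    (List.range m).filter (fun c =>
        !(((List.range m).map (fun c => pvColSep p c)).getD c true) &&
        (c == 0 || ((List.range m).map (fun c => pvColSep p c)).getD (c - 1) true)) =
      (List.range m).filter (fun c => startB p c) := by
  apply List.filter_congr
  intro c hc
  simp only [List.mem_range] at hc
  rw [getD_mask p m c true hc]
  by_cases h0 : c = 0
  · subst h0; simp [startB]
  · rw [getD_mask p m (c - 1) true (by omega)]; rfl

theorem ends_eq (p : List (List Char)) (m : Nat) :
    (List.range m).filter (fun c =>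
        !(((List.range m).map (fun c => pvColSep p c)).getD c true) &&
        (c + 1 == m || ((List.range m).map (fun c => pvColSep p c)).getD (c + 1) true)) =
      (List.range m).filter (fun c => endB p m c) := by
  apply List.filter_congr
  intro c hc
  simp only [List.mem_range] at hc
  rw [getD_mask p m c true hc]
  by_cases h1 : c + 1 = m
  · simp [endB, h1]
  · rw [getD_mask p m (c + 1) true (by omega)]; rfl

-- the mapped end columns of the suffix are exactly the run ends
theorem ends_runs (p : List (List Char)) (m : Nat) :
    ∀ (n c : Nat), m - c ≤ n →
      ((List.range' c (m - c)).filter (endB p m)).map (fun c => c + 1) =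
        (runsFrom p m c).map (fun r => r.2) := by
  intro n
  induction n with
  | zero =>
    intro c hf
    rw [show m - c = 0 by omega, runsFrom_stop p m c (by omega)]
    rfl
  | succ n ih =>
    intro c hf
    by_cases h : c < m
    · rw [show m - c = (m - (c + 1)) + 1 by omega, List.range'_succ, List.filter_cons]
      by_cases hsep : pvColSep p c = true
      · rw [runsFrom_sep p m c h hsep]
        simp only [endB, hsep, Bool.not_true, Bool.false_and]
        exact ih (c + 1) (by omega)
      · by_cases hend : c + 1 = m
        · have he : endB p m c = true := by simp [endB, hsep, hend]
          rw [he, if_pos rfl]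
          rw [runsFrom_nonsep p m c h hsep]
          have hE : endOfC p m c = m := by
            rw [endOfC_nonsep p m c h hsep, hend, endOfC_stop p m m (by omega)]
          rw [hE, runsFrom_stop p m m (by omega)]
          rw [show m - (c + 1) = 0 by omega]
          simp [hend]
        · by_cases hsep1 : pvColSep p (c + 1) = true
          · have he : endB p m c = true := by simp [endB, hsep, hsep1]
            rw [he, if_pos rfl]
            have hE : endOfC p m c = c + 1 := by
              rw [endOfC_nonsep p m c h hsep, endOfC_sep p m (c + 1) (by omega) hsep1]
            rw [runsFrom_nonsep p m c h hsep, hE]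
            simp only [List.map]
            rw [ih (c + 1) (by omega)]
          · have he : endB p m c = false := by simp [endB, hsep, hsep1, hend]
            rw [he, if_neg (by simp)]
            rw [ih (c + 1) (by omega)]
            have hE : endOfC p m c = endOfC p m (c + 1) := endOfC_nonsep p m c h hsep
            rw [runsFrom_nonsep p m c h hsep, hE,
                runsFrom_nonsep p m (c + 1) (by omega) hsep1]
            simp
    · rw [show m - c = 0 by omega, runsFrom_stop p m c h]
      rfl

-- the start columns of the suffix are exactly the run starts (two phases:
-- at a run boundary, and strictly inside a run)
theorem starts_runs (p : List (List Char)) (m : Nat) :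
    ∀ (n c : Nat), m - c ≤ n →
      ((c == 0 || pvColSep p (c - 1)) = true →
        (List.range' c (m - c)).filter (startB p) = (runsFrom p m c).map (fun r => r.1))
      ∧ ((c == 0 || pvColSep p (c - 1)) = false →
        (List.range' c (m - c)).filter (startB p) = (runsFrom p m (endOfC p m c)).map (fun r => r.1)) := by
  intro n
  induction n with
  | zero =>
    intro c hf
    have hcm : ¬ c < m := by omega
    constructor
    · intro _; rw [show m - c = 0 by omega, runsFrom_stop p m c hcm]; rfl
    · intro _
      rw [show m - c = 0 by omega, endOfC_stop p m c hcm, runsFrom_stop p m m (by omega)]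
      rfl
  | succ n ih =>
    intro c hf
    by_cases h : c < m
    · have hrw : m - c = (m - (c + 1)) + 1 := by omega
      constructor
      · intro hb
        rw [hrw, List.range'_succ, List.filter_cons]
        by_cases hsep : pvColSep p c = true
        · simp only [startB, hsep, Bool.not_true, Bool.false_and]
          rw [runsFrom_sep p m c h hsep]
          exact (ih (c + 1) (by omega)).1 (by simp [hsep])
        · have hsb : startB p c = true := by
            simp only [startB]
            simp only [Bool.not_eq_true] at hsep
            simp [hsep, hb]
          rw [hsb, if_pos rfl]
          rw [runsFrom_nonsep p m c h hsep]
          simp only [List.map_cons]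
          have hsep' : pvColSep p c = false := Bool.eq_false_iff.mpr hsep
          have ht := (ih (c + 1) (by omega)).2 (by simp [hsep'])
          rw [ht, ← endOfC_nonsep p m c h hsep]
      · intro hb
        rw [hrw, List.range'_succ, List.filter_cons]
        by_cases hsep : pvColSep p c = true
        · simp only [startB, hsep, Bool.not_true, Bool.false_and]
          rw [endOfC_sep p m c h hsep, runsFrom_sep p m c h hsep]
          exact (ih (c + 1) (by omega)).1 (by simp [hsep])
        · have hsb : startB p c = false := by
            simp only [startB]
            simp [hb]
          rw [hsb, if_neg (by simp)]
          rw [endOfC_nonsep p m c h hsep]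
          have hsep' : pvColSep p c = false := Bool.eq_false_iff.mpr hsep
          exact (ih (c + 1) (by omega)).2 (by simp [hsep'])
    · have hcm : ¬ c < m := h
      constructor
      · intro _; rw [show m - c = 0 by omega, runsFrom_stop p m c hcm]; rfl
      · intro _
        rw [show m - c = 0 by omega, endOfC_stop p m c hcm, runsFrom_stop p m m (by omega)]
        rfl

theorem zip_fst_snd : ∀ (l : List (Nat × Nat)),
    (l.map (fun r => r.1)).zip (l.map (fun r => r.2)) = l
  | [] => rfl
  | (a, b) :: t => by simp [zip_fst_snd t]

theorem enumerate_emit (p : List (List Char)) :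
    ∀ (l : List (Nat × Nat)) (k : Int),
      (PySem.List.enumerate l k).map (fun ie => (ie.1, pvMatrix p ie.2.1 ie.2.2)) = emit p k l := by
  intro l
  induction l with
  | nil => intro k; simp [PySem.List.enumerate, emit]
  | cons a t ih => intro k; cases a; simp [PySem.List.enumerate, emit, ih]

-- B's result is the runs of the whole column range, enumerated from 0
theorem B_eq (lines : List String) :
    processCephalopodMath_alt lines =
      emit (pvPad lines (pvLen lines)) 0 (runsFrom (pvPad lines (pvLen lines)) (pvLen lines) 0) := by
  simp only [processCephalopodMath_alt]
  rw [starts_eq (pvPad lines (pvLen lines)) (pvLen lines),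
      ends_eq (pvPad lines (pvLen lines)) (pvLen lines)]
  rw [List.range_eq_range']
  have hs := (starts_runs (pvPad lines (pvLen lines)) (pvLen lines) (pvLen lines) 0 (by omega)).1
    (by simp)
  have he := ends_runs (pvPad lines (pvLen lines)) (pvLen lines) (pvLen lines) 0 (by omega)
  rw [Nat.sub_zero] at hs he
  rw [hs, he, zip_fst_snd, enumerate_emit]

-- ===== VERDICT (by name: the statement is the Claim_ definition above) =====
theorem processCephalopodMath_spec : Claim_equal_processCephalopodMath := by
  intro lines _ _
  unfold Spec_processCephalopodMath
  rw [A_eq, B_eq]
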